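-- pv_equiv track=rewrite | github.com/hclimente/spada | methods/me_analysis.py | getContingencyTable
-- ===== SOURCE A (Python) =====
-- def getContingencyTable(patientsWithSwitch,patientsWithMutation,allPatients):
--
-- 	mutAndSwitch = 0
-- 	onlySwitch = 0
-- 	onlyMuts = 0
-- 	nothing = 0
--
-- 	for p in allPatients:
--
-- 		if p in patientsWithSwitch and p in patientsWithMutation:
-- 			mutAndSwitch += 1
-- 		elif p in patientsWithSwitch:
-- 			onlySwitch += 1
-- 		elif p in patientsWithMutation:
-- 			onlyMuts += 1
-- 		else:
-- 			nothing += 1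
--
-- 	return mutAndSwitch,onlyMuts,onlySwitch,nothing
-- ===== SOURCE B (Python) =====
-- def getContingencyTable(patientsWithSwitch, patientsWithMutation, allPatients):
--     # Inclusion-exclusion: count marginals, derive the four cells arithmetically.
--     n = len(allPatients)
--     s = sum(1 for p in allPatients if p in patientsWithSwitch)
--     m = sum(1 for p in allPatients if p in patientsWithMutation)
--     b = sum(1 for p in allPatients if p in patientsWithSwitch and p in patientsWithMutation)
--     return b, m - b, s - b, n - s - m + b
-- ===== Notes on version B (the rewrite author's own statement) =====
-- stated objective: alternative
-- what changed: Replaces the 4-way elif classification of each patient by inclusion-exclusion: count only the marginals (switch count, mutation count, both count, total) and derive the four contingency cells arithmetically (b, m-b, s-b, n-s-m+b).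
import Mathlib
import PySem

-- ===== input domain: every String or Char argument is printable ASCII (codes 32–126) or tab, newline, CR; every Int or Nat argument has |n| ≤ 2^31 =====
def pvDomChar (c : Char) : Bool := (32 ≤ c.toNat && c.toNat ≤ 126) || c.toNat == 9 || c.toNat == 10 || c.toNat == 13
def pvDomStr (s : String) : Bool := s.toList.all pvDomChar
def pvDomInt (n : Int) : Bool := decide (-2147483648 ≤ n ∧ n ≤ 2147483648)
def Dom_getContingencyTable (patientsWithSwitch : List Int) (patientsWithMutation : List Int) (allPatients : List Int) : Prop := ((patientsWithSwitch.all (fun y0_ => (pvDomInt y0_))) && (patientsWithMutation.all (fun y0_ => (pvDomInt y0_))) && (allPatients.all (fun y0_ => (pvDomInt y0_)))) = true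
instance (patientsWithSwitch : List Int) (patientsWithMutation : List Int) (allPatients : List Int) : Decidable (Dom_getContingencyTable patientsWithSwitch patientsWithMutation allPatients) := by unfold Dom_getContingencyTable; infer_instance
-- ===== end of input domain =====

-- B replaces A's elif cascade by inclusion-exclusion over the marginal counts; same cost, different algorithm.


-- ===== PORT A =====
-- A: loop over allPatients with four counters and an elif cascade
def gctLoop (patientsWithSwitch patientsWithMutation : List Int) :
    List Int → Int → Int → Int → Int → List Int
  | [], mutAndSwitch, onlySwitch, onlyMuts, nothing => [mutAndSwitch, onlyMuts, onlySwitch, nothing]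
  | p :: rest, mutAndSwitch, onlySwitch, onlyMuts, nothing =>
    if patientsWithSwitch.contains p && patientsWithMutation.contains p then
      gctLoop patientsWithSwitch patientsWithMutation rest (mutAndSwitch + 1) onlySwitch onlyMuts nothing
    else if patientsWithSwitch.contains p then
      gctLoop patientsWithSwitch patientsWithMutation rest mutAndSwitch (onlySwitch + 1) onlyMuts nothing
    else if patientsWithMutation.contains p then
      gctLoop patientsWithSwitch patientsWithMutation rest mutAndSwitch onlySwitch (onlyMuts + 1) nothing
    else
      gctLoop patientsWithSwitch patientsWithMutation rest mutAndSwitch onlySwitch onlyMuts (nothing + 1)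

def getContingencyTable (patientsWithSwitch : List Int) (patientsWithMutation : List Int) (allPatients : List Int) : List Int :=
  gctLoop patientsWithSwitch patientsWithMutation allPatients 0 0 0 0

-- ===== PORT B =====
-- B: inclusion-exclusion — count the marginals, derive the four cells arithmetically
def getContingencyTable_alt (patientsWithSwitch : List Int) (patientsWithMutation : List Int) (allPatients : List Int) : List Int :=
  let n : Int := allPatients.length
  let s : Int := allPatients.countP (fun p => patientsWithSwitch.contains p)
  let m : Int := allPatients.countP (fun p => patientsWithMutation.contains p)
  let b : Int := allPatients.countP (fun p => patientsWithSwitch.contains p && patientsWithMutation.contains p)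
  [b, m - b, s - b, n - s - m + b]

-- ===== PRECONDITION & SPEC =====
def Spec_getContingencyTable (patientsWithSwitch : List Int) (patientsWithMutation : List Int) (allPatients : List Int) (out : List Int) : Prop := out = getContingencyTable_alt patientsWithSwitch patientsWithMutation allPatients
instance (patientsWithSwitch : List Int) (patientsWithMutation : List Int) (allPatients : List Int) (out : List Int) : Decidable (Spec_getContingencyTable patientsWithSwitch patientsWithMutation allPatients out) := by unfold Spec_getContingencyTable; infer_instance

-- ===== CLAIM =====
def Claim_equal_getContingencyTable : Prop := ∀ (patientsWithSwitch : List Int) (patientsWithMutation : List Int) (allPatients : List Int), Dom_getContingencyTable patientsWithSwitch patientsWithMutation allPatients → Spec_getContingencyTable patientsWithSwitch patientsWithMutation allPatients (getContingencyTable patientsWithSwitch patientsWithMutation allPatients)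

-- ===== LEMMAS AND PROOFS =====
theorem gctLoop_eq (sw mu : List Int) (l : List Int) :
    ∀ (mS oS oM no : Int),
      gctLoop sw mu l mS oS oM no =
        let n : Int := l.length
        let s : Int := l.countP (fun p => sw.contains p)
        let m : Int := l.countP (fun p => mu.contains p)
        let b : Int := l.countP (fun p => sw.contains p && mu.contains p)
        [mS + b, oM + (m - b), oS + (s - b), no + (n - s - m + b)] := by
  induction l with
  | nil => intro mS oS oM no; simp [gctLoop]
  | cons p rest ih =>
    intro mS oS oM no
    simp only [gctLoop, List.countP_cons, List.length_cons]
    cases hs : sw.contains p <;> cases hm : mu.contains p <;>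
      simp [ih] <;> push_cast <;> omega

-- ===== VERDICT =====
theorem getContingencyTable_spec : Claim_equal_getContingencyTable := by
  intro sw mu al _
  unfold Spec_getContingencyTable getContingencyTable getContingencyTable_alt
  simp [gctLoop_eq]
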